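-- pv_equiv track=rewrite | github.com/bc36/leetcode | lc_Python/LCCI.py | getKthMagicNumber
-- ===== SOURCE A (Python) =====
-- import bisect, collections, functools, heapq, itertools, math, operator, string
--
-- def getKthMagicNumber(k: int) -> int:
--     q = [1]
--     s = {1}
--     for _ in range(k - 1):
--         x = heapq.heappop(q)
--         for p in 3, 5, 7:
--             if p * x not in s:
--                 heapq.heappush(q, p * x)
--                 s.add(p * x)
--     return q[0]
-- ===== SOURCE B (Python) =====
-- def getKthMagicNumber(k: int) -> int:
--     # three-pointer DP over the sorted magic-number list (no heap, no set)
--     dp = [1]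
--     i3 = i5 = i7 = 0
--     while len(dp) < k:
--         x = min(3 * dp[i3], 5 * dp[i5], 7 * dp[i7])
--         dp.append(x)
--         if x == 3 * dp[i3]:
--             i3 += 1
--         if x == 5 * dp[i5]:
--             i5 += 1
--         if x == 7 * dp[i7]:
--             i7 += 1
--     return dp[-1]
-- ===== Notes on version B (the rewrite author's own statement) =====
-- stated objective: faster
-- what changed: Replaced the heap+seen-set lazy generation with the classic three-pointer DP that merges the streams 3*dp[i3], 5*dp[i5], 7*dp[i7] into the sorted list directly.
import Mathlib
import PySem

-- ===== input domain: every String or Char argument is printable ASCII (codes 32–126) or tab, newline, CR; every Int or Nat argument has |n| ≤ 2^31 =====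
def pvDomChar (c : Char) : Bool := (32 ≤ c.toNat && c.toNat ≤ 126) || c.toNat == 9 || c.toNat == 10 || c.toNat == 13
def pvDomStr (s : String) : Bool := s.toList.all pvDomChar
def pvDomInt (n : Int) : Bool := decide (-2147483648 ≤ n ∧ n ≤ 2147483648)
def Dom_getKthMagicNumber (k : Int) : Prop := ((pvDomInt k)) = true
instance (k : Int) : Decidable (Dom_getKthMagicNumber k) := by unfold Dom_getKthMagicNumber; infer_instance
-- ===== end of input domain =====

-- B replaces A's heap+seen-set generation by the three-pointer DP merge (objective: faster, O(k) vs O(k log k)).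

-- ===== PORT A =====
-- A's heapq has no PySem primitive; the heap is modeled exactly at the multiset level:
-- heappop removes one occurrence of the minimum (all queue elements are distinct, guarded by s),
-- heappush appends, and the final q[0] is the heap minimum. The seen set s is a list of its
-- distinct elements in insertion order. One loop iteration of A:
def stepA (st : List Int × List Int) : List Int × List Int :=
  let x := (PySem.List.min? st.1 (fun y => y)).getD 0   -- x = heapq.heappop(q)
  let q1 := st.1.erase x
  [3, 5, 7].foldl
    (fun (qs : List Int × List Int) p =>
      if p * x ∈ qs.2 then qs else (qs.1 ++ [p * x], qs.2 ++ [p * x]))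
    (q1, st.2)

def getKthMagicNumber (k : Int) : Int :=
  -- q = [1]; s = {1}; for _ in range(k-1): …; return q[0]  (q[0] = heap minimum)
  let st := stepA^[(k - 1).toNat] ([1], [1])
  (PySem.List.min? st.1 (fun y => y)).getD 0

-- ===== PORT B =====
-- one iteration of B's while-loop (dp[i] with i always in range; getD 0 is exact there)
def stepB (st : List Int × ℕ × ℕ × ℕ) : List Int × ℕ × ℕ × ℕ :=
  match st with
  | (dp, i3, i5, i7) =>
    let x := min (min (3 * dp.getD i3 0) (5 * dp.getD i5 0)) (7 * dp.getD i7 0)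
    let dp' := dp ++ [x]
    (dp',
     (if x = 3 * dp.getD i3 0 then i3 + 1 else i3),
     (if x = 5 * dp.getD i5 0 then i5 + 1 else i5),
     (if x = 7 * dp.getD i7 0 then i7 + 1 else i7))

theorem stepB_len (st : List Int × ℕ × ℕ × ℕ) : (stepB st).1.length = st.1.length + 1 := by
  rcases st with ⟨dp, i3, i5, i7⟩; simp [stepB]

def loopB (k : Int) (st : List Int × ℕ × ℕ × ℕ) : List Int :=
  if (st.1.length : Int) < k then loopB k (stepB st) else st.1
termination_by (k - st.1.length).toNat
decreasing_by
  rename_i h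
  have := stepB_len st
  omega

def getKthMagicNumber_alt (k : Int) : Int :=
  (loopB k ([1], 0, 0, 0)).getLastD 0   -- dp[-1]; dp is never empty

-- ===== PRECONDITION & SPEC =====
def Spec_getKthMagicNumber (k : Int) (out : Int) : Prop := out = getKthMagicNumber_alt k
instance (k : Int) (out : Int) : Decidable (Spec_getKthMagicNumber k out) := by unfold Spec_getKthMagicNumber; infer_instance

-- ===== CLAIM (what is proved, stated in full; the proofs are below) =====
def Claim_equal_getKthMagicNumber : Prop := ∀ (k : Int), Dom_getKthMagicNumber k → Spec_getKthMagicNumber k (getKthMagicNumber k)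

-- ===== LEMMAS AND PROOFS =====

/-- magic numbers: products of powers of 3, 5, 7 -/
def Magic (n : Int) : Prop := ∃ a b c : ℕ, n = 3 ^ a * 5 ^ b * 7 ^ c

theorem magic_one : Magic 1 := ⟨0, 0, 0, by norm_num⟩

theorem magic_pos {n : Int} (h : Magic n) : 1 ≤ n := by
  obtain ⟨a, b, c, rfl⟩ := h
  have h3 : (1 : Int) ≤ 3 ^ a := one_le_pow₀ (by norm_num)
  have h5 : (1 : Int) ≤ 5 ^ b := one_le_pow₀ (by norm_num)
  have h7 : (1 : Int) ≤ 7 ^ c := one_le_pow₀ (by norm_num)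
  have h35 : (1 : Int) * 1 ≤ 3 ^ a * 5 ^ b := mul_le_mul h3 h5 (by norm_num) (by positivity)
  have := mul_le_mul (by linarith : (1 : Int) ≤ 3 ^ a * 5 ^ b) h7 (by norm_num) (by positivity)
  linarith

theorem magic_mul {p n : Int} (hp : p = 3 ∨ p = 5 ∨ p = 7) (h : Magic n) : Magic (p * n) := by
  obtain ⟨a, b, c, rfl⟩ := h
  rcases hp with rfl | rfl | rfl
  · exact ⟨a + 1, b, c, by ring⟩
  · exact ⟨a, b + 1, c, by ring⟩
  · exact ⟨a, b, c + 1, by ring⟩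

theorem magic_decomp {n : Int} (h : Magic n) (h1 : n ≠ 1) :
    ∃ p, (p = 3 ∨ p = 5 ∨ p = 7) ∧ ∃ m, Magic m ∧ n = p * m := by
  obtain ⟨a, b, c, rfl⟩ := h
  cases a with
  | succ a => exact ⟨3, Or.inl rfl, 3 ^ a * 5 ^ b * 7 ^ c, ⟨a, b, c, rfl⟩, by ring⟩
  | zero =>
    cases b with
    | succ b => exact ⟨5, Or.inr (Or.inl rfl), 3 ^ 0 * 5 ^ b * 7 ^ c, ⟨0, b, c, rfl⟩, by ring⟩
    | zero =>
      cases c with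
      | succ c => exact ⟨7, Or.inr (Or.inr rfl), 3 ^ 0 * 5 ^ 0 * 7 ^ c, ⟨0, 0, c, rfl⟩, by ring⟩
      | zero => simp at h1

/-- the pointer invariant of B for factor p -/
def PtrInv (dp : List Int) (t : ℕ) (p : Int) (i : ℕ) : Prop :=
  i ≤ t ∧ dp.getD t 0 < p * dp.getD i 0 ∧ ∀ j < i, p * dp.getD j 0 ≤ dp.getD t 0

/-- coupling invariant between A's state (q, s) and B's state (dp, i3, i5, i7) after t steps -/
structure MInv (t : ℕ) (q s dp : List Int) (i3 i5 i7 : ℕ) : Prop where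
  hlen : dp.length = t + 1
  hhead : dp.getD 0 0 = 1
  hsort : dp.Pairwise (· < ·)
  hmagic : ∀ z ∈ dp, Magic z
  hcomp : ∀ n, Magic n → n ≤ dp.getD t 0 → n ∈ dp
  hnodup : q.Nodup
  hs : ∀ z, z ∈ s ↔ (z = 1 ∨ ∃ p, (p = 3 ∨ p = 5 ∨ p = 7) ∧ ∃ j < t, z = p * dp.getD j 0)
  hq : ∀ z, z ∈ q ↔ (z ∈ s ∧ ∀ j < t, z ≠ dp.getD j 0)
  hp3 : PtrInv dp t 3 i3
  hp5 : PtrInv dp t 5 i5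
  hp7 : PtrInv dp t 7 i7
  hmem : dp.getD t 0 ∈ q
  hlb : ∀ z ∈ q, dp.getD t 0 ≤ z


theorem getD_lt {l : List Int} {i : ℕ} (h : i < l.length) : l.getD i 0 = l[i] :=
  List.getD_eq_getElem l 0 h

theorem getD_concat_lt (l : List Int) (x : Int) {i : ℕ} (h : i < l.length) :
    (l ++ [x]).getD i 0 = l.getD i 0 := by
  rw [getD_lt (by simp; omega), getD_lt h, List.getElem_append_left h]

theorem getD_concat_len (l : List Int) (x : Int) : (l ++ [x]).getD l.length 0 = x := by
  rw [getD_lt (by simp)]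
  simp

theorem sorted_lt {l : List Int} (hs : l.Pairwise (· < ·)) {i j : ℕ}
    (hij : i < j) (hj : j < l.length) : l.getD i 0 < l.getD j 0 := by
  rw [getD_lt (by omega), getD_lt hj]
  exact List.pairwise_iff_getElem.mp hs i j (by omega) hj hij

theorem sorted_le {l : List Int} (hs : l.Pairwise (· < ·)) {i j : ℕ}
    (hij : i ≤ j) (hj : j < l.length) : l.getD i 0 ≤ l.getD j 0 := by
  rcases Nat.lt_or_ge i j with h | h
  · exact le_of_lt (sorted_lt hs h hj)
  · have : i = j := by omega
    subst this; rfl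

/-- an element of a sorted list below another element sits at a smaller index -/
theorem index_of_mem_lt {l : List Int} (hs : l.Pairwise (· < ·)) {m : Int} {j : ℕ}
    (hm : m ∈ l) (_hj : j < l.length) (hlt : m < l.getD j 0) :
    ∃ j' < j, l.getD j' 0 = m := by
  obtain ⟨i, hi, rfl⟩ := List.mem_iff_getElem.mp hm
  refine ⟨i, ?_, getD_lt hi⟩
  by_contra hc
  have := sorted_le hs (by omega : j ≤ i) hi
  rw [getD_lt hi] at this
  omega

/-- the push body of A's inner for-loop (proof-side name for stepA's lambda) -/
def pushF (x : Int) (qs : List Int × List Int) (p : Int) : List Int × List Int :=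
  if p * x ∈ qs.2 then qs else (qs.1 ++ [p * x], qs.2 ++ [p * x])

theorem pushF_run (x : Int) (ps : List Int) :
    ∀ (q s : List Int), (∀ z ∈ q, z ∈ s) → q.Nodup →
    (∀ z, z ∈ (ps.foldl (pushF x) (q, s)).2 ↔ (z ∈ s ∨ ∃ p ∈ ps, z = p * x)) ∧
    (∀ z, z ∈ (ps.foldl (pushF x) (q, s)).1 ↔ (z ∈ q ∨ (z ∉ s ∧ ∃ p ∈ ps, z = p * x))) ∧
    (ps.foldl (pushF x) (q, s)).1.Nodup := by
  induction ps with
  | nil => intro q s hqs hnd; simp [hnd]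
  | cons p ps ih =>
    intro q s hqs hnd
    simp only [List.foldl_cons]
    by_cases hmem : p * x ∈ s
    · rw [show pushF x (q, s) p = (q, s) by simp [pushF, hmem]]
      obtain ⟨h1, h2, h3⟩ := ih q s hqs hnd
      refine ⟨fun z => ?_, fun z => ?_, h3⟩
      · have hBA : z = p * x → z ∈ s := fun h => h ▸ hmem
        rw [h1]
        simp only [List.mem_cons, exists_eq_or_imp]
        tauto
      · have hBA : z = p * x → z ∈ s := fun h => h ▸ hmem
        rw [h2]
        simp only [List.mem_cons, exists_eq_or_imp]
        tauto
    · rw [show pushF x (q, s) p = (q ++ [p * x], s ++ [p * x]) by simp [pushF, hmem]]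
      have hqs' : ∀ z ∈ q ++ [p * x], z ∈ s ++ [p * x] := by
        intro z hz
        rcases List.mem_append.mp hz with hz | hz
        · exact List.mem_append.mpr (Or.inl (hqs z hz))
        · exact List.mem_append.mpr (Or.inr hz)
      have hnd' : (q ++ [p * x]).Nodup := by
        rw [List.nodup_append]
        refine ⟨hnd, List.nodup_singleton _, ?_⟩
        intro a ha b hb
        simp only [List.mem_singleton] at hb; subst hb
        intro hab; subst hab
        exact hmem (hqs _ ha)
      obtain ⟨h1, h2, h3⟩ := ih (q ++ [p * x]) (s ++ [p * x]) hqs' hnd'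
      refine ⟨fun z => ?_, fun z => ?_, h3⟩
      · have hBnA : z = p * x → z ∉ s := fun h hc => hmem (h ▸ hc)
        rw [h1]
        simp only [List.mem_cons, List.mem_append, exists_eq_or_imp]
        tauto
      · have hBnA : z = p * x → z ∉ s := fun h hc => hmem (h ▸ hc)
        rw [h2]
        simp only [List.mem_cons, List.mem_append, exists_eq_or_imp,
          not_or]
        tauto

theorem minq_eq {q : List Int} {a : Int} (ha : a ∈ q) (hlb : ∀ z ∈ q, a ≤ z) :
    (PySem.List.min? q (fun y => y)).getD 0 = a := by
  cases hmin : PySem.List.min? q (fun y => y) with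
  | none =>
    rw [PySem.List.min?_eq_none_iff] at hmin
    rw [hmin] at ha; simp at ha
  | some m =>
    have hm1 : m ∈ q := PySem.List.min?_mem hmin
    have hm2 : m ≤ a := PySem.List.min?_isMin hmin _ ha
    exact le_antisymm hm2 (hlb m hm1) ▸ rfl

theorem ptr_step {dp : List Int} {t : ℕ} {p x : Int} {i : ℕ}
    (hlen : dp.length = t + 1) (hsort : dp.Pairwise (· < ·))
    (hp : 3 ≤ p) (hptr : PtrInv dp t p i)
    (hxle : x ≤ p * dp.getD i 0) (hxgt : dp.getD t 0 < x) (hx1 : 1 ≤ x) :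
    PtrInv (dp ++ [x]) (t + 1) p (if x = p * dp.getD i 0 then i + 1 else i) := by
  obtain ⟨hit, hgt, hlo⟩ := hptr
  have hlast' : (dp ++ [x]).getD (t + 1) 0 = x := by
    rw [← hlen]; exact getD_concat_len dp x
  by_cases hx : x = p * dp.getD i 0
  · rw [if_pos hx]
    refine ⟨by omega, ?_, ?_⟩
    · rw [hlast']
      rcases Nat.lt_or_ge (i + 1) dp.length with hi1 | hi1
      · rw [getD_concat_lt _ _ hi1]
        have := sorted_lt hsort (Nat.lt_succ_self i) hi1
        calc x = p * dp.getD i 0 := hx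
        _ < p * dp.getD (i + 1) 0 := by nlinarith
      · have : i + 1 = dp.length := by omega
        rw [this, getD_concat_len]
        nlinarith
    · intro j hj
      rw [hlast', getD_concat_lt _ _ (by omega)]
      rcases Nat.lt_or_ge j i with hji | hji
      · exact le_of_lt (lt_of_le_of_lt (hlo j hji) hxgt)
      · have : j = i := by omega
        subst this; omega
  · rw [if_neg hx]
    refine ⟨by omega, ?_, ?_⟩
    · rw [hlast', getD_concat_lt _ _ (by omega)]
      omega
    · intro j hj
      rw [hlast', getD_concat_lt _ _ (by omega)]
      exact le_of_lt (lt_of_le_of_lt (hlo j hj) hxgt)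

theorem inv_step {t : ℕ} {q s dp : List Int} {i3 i5 i7 : ℕ}
    (h : MInv t q s dp i3 i5 i7) :
    MInv (t + 1) (stepA (q, s)).1 (stepA (q, s)).2
      (stepB (dp, i3, i5, i7)).1 (stepB (dp, i3, i5, i7)).2.1
      (stepB (dp, i3, i5, i7)).2.2.1 (stepB (dp, i3, i5, i7)).2.2.2 := by
  obtain ⟨hlen, hhead, hsort, hmagic, hcomp, hnodup, hs, hq, hp3, hp5, hp7, hmem, hlb⟩ := h
  have htlen : t < dp.length := by omega
  set last := dp.getD t 0 with hlastd
  have hlast_mem_dp : last ∈ dp := by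
    rw [hlastd, getD_lt htlen]; exact List.getElem_mem _
  have hlast_magic : Magic last := hmagic _ hlast_mem_dp
  have hlast1 : 1 ≤ last := magic_pos hlast_magic
  have hle_last : ∀ z ∈ dp, z ≤ last := by
    intro z hz
    obtain ⟨i, hi, rfl⟩ := List.mem_iff_getElem.mp hz
    rw [← getD_lt hi, hlastd]
    exact sorted_le hsort (by omega) htlen
  -- the three candidates and B's new value x
  set c3 := 3 * dp.getD i3 0 with hc3
  set c5 := 5 * dp.getD i5 0 with hc5
  set c7 := 7 * dp.getD i7 0 with hc7
  set x := min (min c3 c5) c7 with hxdef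
  have hcand : ∀ (p : Int) (i : ℕ), (p = 3 ∨ p = 5 ∨ p = 7) → PtrInv dp t p i →
      Magic (p * dp.getD i 0) ∧ last < p * dp.getD i 0 := by
    rintro p i hp ⟨hit, hgt, -⟩
    have hmemi : dp.getD i 0 ∈ dp := by
      rw [getD_lt (by omega)]; exact List.getElem_mem _
    exact ⟨magic_mul hp (hmagic _ hmemi), hgt⟩
  have h3f := hcand 3 i3 (Or.inl rfl) hp3
  have h5f := hcand 5 i5 (Or.inr (Or.inl rfl)) hp5
  have h7f := hcand 7 i7 (Or.inr (Or.inr rfl)) hp7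
  have hx_le3 : x ≤ c3 := le_trans (min_le_left _ _) (min_le_left _ _)
  have hx_le5 : x ≤ c5 := le_trans (min_le_left _ _) (min_le_right _ _)
  have hx_le7 : x ≤ c7 := min_le_right _ _
  have hx_eq : x = c3 ∨ x = c5 ∨ x = c7 := by
    rcases min_choice (min c3 c5) c7 with h' | h'
    · rcases min_choice c3 c5 with h'' | h''
      · exact Or.inl (by rw [hxdef, h', h''])
      · exact Or.inr (Or.inl (by rw [hxdef, h', h'']))
    · exact Or.inr (Or.inr (by rw [hxdef, h']))
  have hx_magic : Magic x := by
    rcases hx_eq with h' | h' | h' <;> rw [h']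
    exacts [h3f.1, h5f.1, h7f.1]
  have hx_gt : last < x := by
    rcases hx_eq with h' | h' | h' <;> rw [h']
    exacts [h3f.2, h5f.2, h7f.2]
  have hx1 : 1 ≤ x := by omega
  -- x is the least magic number above last
  have hx_min : ∀ n, Magic n → last < n → x ≤ n := by
    intro n hn hgtn
    have hne1 : n ≠ 1 := by omega
    obtain ⟨p, hp, m, hm, rfl⟩ := magic_decomp hn hne1
    have hpge : 3 ≤ p := by rcases hp with rfl | rfl | rfl <;> norm_num
    have hm1 : 1 ≤ m := magic_pos hm
    by_cases hml : m ≤ last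
    · have hmdp : m ∈ dp := hcomp m hm hml
      obtain ⟨jm, hjm, hdpjm⟩ := List.mem_iff_getElem.mp hmdp
      have hjd : dp.getD jm 0 = m := by rw [getD_lt hjm, hdpjm]
      -- pick the pointer for this p
      rcases hp with rfl | rfl | rfl
      · obtain ⟨hit, hgt, hlo⟩ := hp3
        have hile : i3 ≤ jm := by
          by_contra hc
          have := hlo jm (by omega)
          rw [hjd] at this; omega
        have := sorted_le hsort hile hjm
        rw [hjd] at this
        omega
      · obtain ⟨hit, hgt, hlo⟩ := hp5
        have hile : i5 ≤ jm := by
          by_contra hc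
          have := hlo jm (by omega)
          rw [hjd] at this; omega
        have := sorted_le hsort hile hjm
        rw [hjd] at this
        omega
      · obtain ⟨hit, hgt, hlo⟩ := hp7
        have hile : i7 ≤ jm := by
          by_contra hc
          have := hlo jm (by omega)
          rw [hjd] at this; omega
        have := sorted_le hsort hile hjm
        rw [hjd] at this
        omega
    · have hmgt : last < m := by omega
      have hi3le : dp.getD i3 0 ≤ last := hle_last _ (by
        rw [getD_lt (by have := hp3.1; omega : i3 < dp.length)]
        exact List.getElem_mem _)
      have h3m : 3 * m ≤ p * m := by nlinarith
      omega
  -- reduce the A side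
  have hxpop : (PySem.List.min? q (fun y => y)).getD 0 = last := minq_eq hmem hlb
  have hstepA : stepA (q, s) = [3, 5, 7].foldl (pushF last) (q.erase last, s) := by
    simp only [stepA, hxpop]
    rfl
  have hq_sub : ∀ z ∈ q.erase last, z ∈ s := fun z hz =>
    ((hq z).mp (List.mem_of_mem_erase hz)).1
  obtain ⟨hr2, hr1, hrnd⟩ := pushF_run last [3, 5, 7] (q.erase last) s hq_sub (hnodup.erase _)
  -- reduce the B side
  have hstepB : stepB (dp, i3, i5, i7) =
      (dp ++ [x],
       (if x = c3 then i3 + 1 else i3),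
       (if x = c5 then i5 + 1 else i5),
       (if x = c7 then i7 + 1 else i7)) := rfl
  rw [hstepA, hstepB]
  set r := [(3 : Int), 5, 7].foldl (pushF last) (q.erase last, s) with hrdef
  -- basic facts about the new dp
  have hlast' : (dp ++ [x]).getD (t + 1) 0 = x := by
    rw [← hlen]; exact getD_concat_len dp x
  have hgetD' : ∀ j ≤ t, (dp ++ [x]).getD j 0 = dp.getD j 0 := fun j hj =>
    getD_concat_lt dp x (by omega)
  -- every dp entry is already in s
  have dp_mem_s : ∀ j ≤ t, dp.getD j 0 ∈ s := by
    intro j hj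
    rcases Nat.eq_zero_or_pos j with rfl | hj0
    · rw [hhead]; exact (hs 1).mpr (Or.inl rfl)
    · have hjlen : j < dp.length := by omega
      have hd1 : 1 < dp.getD j 0 := by
        have := sorted_lt hsort hj0 hjlen
        omega
      have hdm : Magic (dp.getD j 0) := hmagic _ (by rw [getD_lt hjlen]; exact List.getElem_mem _)
      obtain ⟨p, hp, m, hm, heq⟩ := magic_decomp hdm (by omega)
      have hpge : 3 ≤ p := by rcases hp with rfl | rfl | rfl <;> norm_num
      have hm1 : 1 ≤ m := magic_pos hm
      have hmlt : m < dp.getD j 0 := by nlinarith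
      have hmle : m ≤ last := by
        have := hle_last _ (by rw [getD_lt hjlen]; exact (List.getElem_mem _) :
          dp.getD j 0 ∈ dp)
        omega
      obtain ⟨j', hj', hdj'⟩ := index_of_mem_lt hsort (hcomp m hm hmle) hjlen hmlt
      exact (hs _).mpr (Or.inr ⟨p, hp, j', by omega, by rw [hdj', heq]⟩)
  have hlast_s : last ∈ s := dp_mem_s t (le_refl t)
  -- characterization of the new s (r.2)
  have hs' : ∀ z, z ∈ r.2 ↔
      (z = 1 ∨ ∃ p, (p = 3 ∨ p = 5 ∨ p = 7) ∧ ∃ j < t + 1, z = p * (dp ++ [x]).getD j 0) := by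
    intro z
    rw [hr2 z, hs z]
    constructor
    · rintro ((rfl | ⟨p, hp, j, hj, rfl⟩) | ⟨p, hpm, rfl⟩)
      · exact Or.inl rfl
      · exact Or.inr ⟨p, hp, j, by omega, by rw [hgetD' j (by omega)]⟩
      · refine Or.inr ⟨p, ?_, t, by omega, by rw [hgetD' t (le_refl t)]⟩
        simpa using hpm
    · rintro (rfl | ⟨p, hp, j, hj, rfl⟩)
      · exact Or.inl (Or.inl rfl)
      · rcases Nat.lt_or_ge j t with hjt | hjt
        · exact Or.inl (Or.inr ⟨p, hp, j, hjt, by rw [hgetD' j (by omega)]⟩)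
        · have : j = t := by omega
          subst this
          exact Or.inr ⟨p, by simpa using hp, by rw [hgetD' j (le_refl j)]⟩
  -- characterization of the new q (r.1)
  have hsplit : ∀ z, (∀ j < t + 1, z ≠ (dp ++ [x]).getD j 0) ↔
      ((∀ j < t, z ≠ dp.getD j 0) ∧ z ≠ last) := by
    intro z
    constructor
    · intro hall
      refine ⟨fun j hj => ?_, ?_⟩
      · have := hall j (by omega)
        rwa [hgetD' j (by omega)] at this
      · have := hall t (by omega)
        rwa [hgetD' t (le_refl t)] at this
    · rintro ⟨hold, hlz⟩ j hj
      rcases Nat.lt_or_ge j t with hjt | hjt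
      · rw [hgetD' j (by omega)]; exact hold j hjt
      · have : j = t := by omega
        subst this
        rw [hgetD' j (le_refl j)]
        exact hlz
  have hq' : ∀ z, z ∈ r.1 ↔ (z ∈ r.2 ∧ ∀ j < t + 1, z ≠ (dp ++ [x]).getD j 0) := by
    intro z
    rw [hr1 z, hr2 z, hsplit z, (hnodup.mem_erase_iff), hq z]
    constructor
    · rintro (⟨hne, hzs, hold⟩ | ⟨hns, p, hpm, rfl⟩)
      · exact ⟨Or.inl hzs, hold, hne⟩
      · refine ⟨Or.inr ⟨p, hpm, rfl⟩, fun j hj => ?_, ?_⟩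
        · exact fun hc => hns (by rw [hc]; exact dp_mem_s j (by omega))
        · exact fun hc => hns (by rw [hc]; exact hlast_s)
    · rintro ⟨hsm, hold, hne⟩
      by_cases hzs : z ∈ s
      · exact Or.inl ⟨hne, hzs, hold⟩
      · rcases hsm with hzs' | hnew
        · exact absurd hzs' hzs
        · exact Or.inr ⟨hzs, hnew⟩
  -- all elements of the new s are magic
  have hs_magic : ∀ z ∈ r.2, Magic z := by
    intro z hz
    rcases (hs' z).mp hz with rfl | ⟨p, hp, j, hj, rfl⟩
    · exact magic_one
    · refine magic_mul hp (hmagic _ ?_)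
      rcases Nat.lt_or_ge j t with hjt | hjt
      · rw [hgetD' j (by omega), getD_lt (by omega : j < dp.length)]
        exact List.getElem_mem _
      · have : j = t := by omega
        subst this
        rw [hgetD' j (le_refl j)]
        exact hlast_mem_dp
  -- x is in the new queue
  have hx_ne_dp : ∀ j < t + 1, x ≠ (dp ++ [x]).getD j 0 := by
    rw [hsplit x]
    constructor
    · intro j hj hc
      have hjlen : j < dp.length := by omega
      have := hle_last _ (by rw [hc, getD_lt hjlen]; exact List.getElem_mem _ : x ∈ dp)
      omega
    · omega
  have hx_in_s' : x ∈ r.2 := by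
    rw [hs' x]
    have hxne1 : x ≠ 1 := by omega
    obtain ⟨p, hp, m, hm, heq⟩ := magic_decomp hx_magic hxne1
    have hpge : 3 ≤ p := by rcases hp with rfl | rfl | rfl <;> norm_num
    have hm1 : 1 ≤ m := magic_pos hm
    have hmlt : m < x := by nlinarith
    have hmle : m ≤ last := by
      by_contra hc
      have := hx_min m hm (by omega)
      omega
    obtain ⟨jm, hjm, hdpjm⟩ := List.mem_iff_getElem.mp (hcomp m hm hmle)
    have hjd : dp.getD jm 0 = m := by rw [getD_lt hjm, hdpjm]
    exact Or.inr ⟨p, hp, jm, by omega, by rw [hgetD' jm (by omega), hjd, heq]⟩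
  -- assemble the invariant
  refine ⟨by simp [hlen], ?_, ?_, ?_, ?_, hrnd, hs', hq', ?_, ?_, ?_, ?_, ?_⟩
  · rw [hgetD' 0 (by omega)]; exact hhead
  · rw [List.pairwise_append]
    refine ⟨hsort, List.pairwise_singleton _ _, ?_⟩
    intro a ha b hb
    simp only [List.mem_singleton] at hb; subst hb
    exact lt_of_le_of_lt (hle_last a ha) hx_gt
  · intro z hz
    rcases List.mem_append.mp hz with hz | hz
    · exact hmagic z hz
    · simp only [List.mem_singleton] at hz; subst hz; exact hx_magic
  · intro n hn hle
    rw [hlast'] at hle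
    by_cases hml : n ≤ last
    · exact List.mem_append.mpr (Or.inl (hcomp n hn hml))
    · have := hx_min n hn (by omega)
      have : n = x := by omega
      subst this
      exact List.mem_append.mpr (Or.inr (by simp))
  · exact ptr_step hlen hsort (by norm_num) hp3 hx_le3 hx_gt hx1
  · exact ptr_step hlen hsort (by norm_num) hp5 hx_le5 hx_gt hx1
  · exact ptr_step hlen hsort (by norm_num) hp7 hx_le7 hx_gt hx1
  · rw [hlast']
    exact (hq' x).mpr ⟨hx_in_s', hx_ne_dp⟩
  · intro z hz
    rw [hlast']
    obtain ⟨hzs, hall⟩ := (hq' z).mp hz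
    have hzmagic : Magic z := hs_magic z hzs
    have hznotdp : z ∉ dp := by
      intro hc
      obtain ⟨i, hi, rfl⟩ := List.mem_iff_getElem.mp hc
      have := hall i (by omega)
      rw [hgetD' i (by omega), getD_lt hi] at this
      exact this rfl
    have : last < z := by
      by_contra hc
      exact hznotdp (hcomp z hzmagic (by omega))
    exact hx_min z hzmagic this
theorem inv_base : MInv 0 [1] [1] [1] 0 0 0 := by
  refine ⟨by simp, rfl, by simp, ?_, ?_, by simp, by simp, by simp, ?_, ?_, ?_, by simp, by simp⟩
  · intro z hz; simp at hz; subst hz; exact magic_one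
  · intro n hn hle
    have := magic_pos hn
    simp only [List.getD] at hle ⊢
    simp at hle ⊢
    omega
  · exact ⟨le_refl 0, by norm_num [List.getD], by omega⟩
  · exact ⟨le_refl 0, by norm_num [List.getD], by omega⟩
  · exact ⟨le_refl 0, by norm_num [List.getD], by omega⟩

theorem inv_run (t : ℕ) :
    MInv t (stepA^[t] ([1], [1])).1 (stepA^[t] ([1], [1])).2
      (stepB^[t] ([1], 0, 0, 0)).1 (stepB^[t] ([1], 0, 0, 0)).2.1
      (stepB^[t] ([1], 0, 0, 0)).2.2.1 (stepB^[t] ([1], 0, 0, 0)).2.2.2 := by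
  induction t with
  | zero => simpa using inv_base
  | succ t ih =>
    simp only [Function.iterate_succ_apply']
    exact inv_step ih

theorem loopB_eq_iterate (k : Int) (st : List Int × ℕ × ℕ × ℕ) :
    loopB k st = (stepB^[(k - st.1.length).toNat] st).1 := by
  rw [loopB]
  split
  next h =>
    rw [loopB_eq_iterate k (stepB st)]
    have hl := stepB_len st
    have heq : (k - (st.1.length : Int)).toNat = (k - ((stepB st).1.length : Int)).toNat + 1 := by
      rw [hl]; push_cast; omega
    rw [heq, Function.iterate_succ_apply]
  next h =>
    have heq : (k - (st.1.length : Int)).toNat = 0 := by omega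
    simp [heq]
termination_by (k - st.1.length).toNat
decreasing_by have := stepB_len st; omega

theorem getLastD_eq_getD (l : List Int) :
    l.getLastD 0 = l.getD (l.length - 1) 0 := by
  cases l with
  | nil => rfl
  | cons a l =>
    simp [List.getLastD_eq_getLast?, List.getLast?_eq_getElem?, List.getD_eq_getElem?_getD]

-- ===== VERDICT (by name: the statement is the Claim_ definition above) =====
theorem getKthMagicNumber_spec : Claim_equal_getKthMagicNumber := by
  intro k _
  unfold Spec_getKthMagicNumber getKthMagicNumber getKthMagicNumber_alt
  have hinv := inv_run (k - 1).toNat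
  set t := (k - 1).toNat with ht
  set st := stepA^[t] ([1], [1]) with hst
  set sb := stepB^[t] (([1] : List Int), 0, 0, 0) with hsb
  -- A's value is the minimum of the final queue, which is dp.getD t 0
  have hq := hinv.hmem
  have hlb := hinv.hlb
  have hA : (PySem.List.min? st.1 (fun y => y)).getD 0 = sb.1.getD t 0 := by
    cases hmin : PySem.List.min? st.1 (fun y => y) with
    | none =>
      rw [PySem.List.min?_eq_none_iff] at hmin
      rw [hmin] at hq; simp at hq
    | some m =>
      have hm1 : m ∈ st.1 := PySem.List.min?_mem hmin
      have hm2 : m ≤ sb.1.getD t 0 := PySem.List.min?_isMin hmin _ hq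
      have hm3 : sb.1.getD t 0 ≤ m := hlb m hm1
      simp [le_antisymm hm2 hm3]
  -- B's value is the last element of dp, which is dp.getD t 0
  have hB : (loopB k ([1], 0, 0, 0)).getLastD 0 = sb.1.getD t 0 := by
    have : loopB k (([1] : List Int), 0, 0, 0) = sb.1 := by
      rw [loopB_eq_iterate]; simp [hsb, ht]
    rw [this, getLastD_eq_getD, hinv.hlen]; simp
  rw [hA, hB]
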